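-- pv_equiv track=rewrite | github.com/alifahsanul/Codility | MaxCounters.py | solution
-- ===== SOURCE A (Python) =====
-- def solution(N, A):
--     arrayN=[0]*N
--     maxtemp=0
--     lastupdate=0
--     for Ai in A:
--         if 1<=Ai<=N:
--             if arrayN[Ai-1]<lastupdate:
--                 arrayN[Ai-1]=lastupdate
--             arrayN[Ai-1] += 1
--             if arrayN[Ai-1]>maxtemp:
--                 maxtemp=arrayN[Ai-1]
--         else:
--             lastupdate=maxtemp
--     for i in range(len(arrayN)):
--         if arrayN[i]<lastupdate:
--             arrayN[i]=lastupdate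
--     return arrayN
-- ===== SOURCE B (Python) =====
-- def solution(N, A):
--     base = 0          # max value reached before the latest max-all operation
--     best = 0          # largest count recorded since the latest max-all
--     tally = {}        # counts of increments per counter since the latest max-all
--     for x in A:
--         if 1 <= x <= N:
--             c = tally.get(x, 0) + 1
--             tally[x] = c
--             if c > best:
--                 best = c
--         else:
--             base += best
--             best = 0
--             tally = {}
--     return [base + tally.get(i, 0) for i in range(1, N + 1)]
-- ===== Notes on version B (the rewrite author's own statement) =====
-- stated objective: alternative
-- what changed: B keeps no counter array at all: it maintains an integer baseline plus a dict of per-counter increments since the last max-all (resetting the dict on each max-all) and materialises the answer once at the end, instead of A's length-N array with a lazy lastupdate baseline and a final normalization pass.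
import Mathlib
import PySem

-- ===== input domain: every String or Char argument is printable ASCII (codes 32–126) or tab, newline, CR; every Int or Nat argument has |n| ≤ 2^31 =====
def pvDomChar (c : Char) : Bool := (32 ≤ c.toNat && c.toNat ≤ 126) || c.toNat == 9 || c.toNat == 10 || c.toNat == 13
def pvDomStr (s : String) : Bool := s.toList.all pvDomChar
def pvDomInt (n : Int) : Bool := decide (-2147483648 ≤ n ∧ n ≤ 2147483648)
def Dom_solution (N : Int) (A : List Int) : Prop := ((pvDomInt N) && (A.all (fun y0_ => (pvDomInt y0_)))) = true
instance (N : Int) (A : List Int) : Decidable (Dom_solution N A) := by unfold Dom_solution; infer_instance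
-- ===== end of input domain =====

-- B keeps no counter array during the loop: an integer baseline plus a dict of per-counter
-- increments since the last max-all, materialising the answer once at the end (alternative algorithm).

-- ===== PORT A =====
-- the index Ai-1 is always in range inside the guard (1 ≤ Ai ≤ N and the array has N elements),
-- so `getD _ 0` is exact for Python's arrayN[Ai-1]
def stepA_solution (N : Int) (s : List Int × Int × Int) (Ai : Int) : List Int × Int × Int :=
  let arr := s.1
  let mt := s.2.1
  let lu := s.2.2
  if 1 ≤ Ai ∧ Ai ≤ N then
    let i := (Ai - 1).toNat
    let v0 := arr.getD i 0
    let v1 := if v0 < lu then lu else v0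
    let v := v1 + 1
    (arr.set i v, if mt < v then v else mt, lu)
  else
    (arr, mt, mt)

def solution (N : Int) (A : List Int) : List Int :=
  let s := A.foldl (stepA_solution N) (List.replicate N.toNat 0, 0, 0)
  s.1.map (fun x => if x < s.2.2 then s.2.2 else x)

-- ===== PORT B =====
def stepB_solution (N : Int) (s : Int × PySem.Dict Int Int × Int) (x : Int) : Int × PySem.Dict Int Int × Int :=
  if 1 ≤ x ∧ x ≤ N then
    let c := s.2.1.getD x 0 + 1
    (s.1, s.2.1.insert x c, if s.2.2 < c then c else s.2.2)
  else
    (s.1 + s.2.2, PySem.Dict.empty, 0)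

def solution_alt (N : Int) (A : List Int) : List Int :=
  let s := A.foldl (stepB_solution N) (0, PySem.Dict.empty, 0)
  (PySem.List.pyRange 1 (N + 1) 1).map (fun i => s.1 + s.2.1.getD i 0)

-- ===== PRECONDITION & SPEC =====
def Spec_solution (N : Int) (A : List Int) (out : List Int) : Prop := out = solution_alt N A
instance (N : Int) (A : List Int) (out : List Int) : Decidable (Spec_solution N A out) := by unfold Spec_solution; infer_instance

-- ===== CLAIM (what is proved, stated in full; the proofs are below) =====
def Claim_equal_solution : Prop := ∀ (N : Int) (A : List Int), Dom_solution N A → Spec_solution N A (solution N A)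

-- ===== LEMMAS AND PROOFS =====

-- A's normalization ("raise x to the lastupdate baseline")
def pvF (lu x : Int) : Int := if x < lu then lu else x

-- invariant relating A's lazy state (arr, maxtemp, lastupdate) to B's (base, tally, best)
def pvInv (N : Int) (sA : List Int × Int × Int) (sB : Int × PySem.Dict Int Int × Int) : Prop :=
  sA.1.length = N.toNat ∧
  sA.2.1 = sB.1 + sB.2.2 ∧
  sA.2.2 ≤ sA.2.1 ∧
  (∀ x ∈ sA.1, x ≤ sA.2.1) ∧
  (∀ k : Nat, (hk : k < sA.1.length) → pvF sA.2.2 sA.1[k] = sB.1 + sB.2.1.getD ((k : Int) + 1) 0)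

theorem pvInv_init (N : Int) :
    pvInv N (List.replicate N.toNat 0, 0, 0) (0, PySem.Dict.empty, 0) := by
  refine ⟨by simp, by simp, le_refl _, ?_, ?_⟩
  · intro x hx
    simp [List.eq_of_mem_replicate hx]
  · intro k hk
    simp [pvF, PySem.Dict.getD_empty]

theorem pvInv_step (N x : Int) (sA : List Int × Int × Int) (sB : Int × PySem.Dict Int Int × Int)
    (h : pvInv N sA sB) : pvInv N (stepA_solution N sA x) (stepB_solution N sB x) := by
  obtain ⟨arr, mt, lu⟩ := sA
  obtain ⟨b, t, best⟩ := sB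
  obtain ⟨hlen, hmt, hlu, hbd, hidx⟩ := h
  simp only at hlen hmt hlu hbd hidx
  by_cases hg : 1 ≤ x ∧ x ≤ N
  · -- increment branch
    have hiN : (x - 1).toNat < arr.length := by
      have : (0:Int) < N := lt_of_lt_of_le (by omega) hg.2
      omega
    simp only [stepA_solution, stepB_solution, if_pos hg]
    set i := (x - 1).toNat with hidef
    have hix : (i : Int) + 1 = x := by omega
    have hold : pvF lu arr[i] = b + t.getD x 0 := by
      rw [← hix]; exact hidx i hiN
    set c : Int := t.getD x 0 + 1 with hc
    have hv0 : arr.getD i 0 = arr[i] := List.getD_eq_getElem arr 0 hiN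
    have hv : (if arr.getD i 0 < lu then lu else arr.getD i 0) + 1 = b + c := by
      rw [hv0]
      have := hold
      simp only [pvF] at this
      omega
    refine ⟨by simpa using hlen, ?_, ?_, ?_, ?_⟩
    · -- maxtemp = base + best
      simp only [hv, hmt]
      split_ifs <;> omega
    · -- lu ≤ mt'
      simp only []
      split_ifs <;> omega
    · -- bound
      intro y hy
      rcases List.mem_or_eq_of_mem_set hy with hy | rfl
      · have := hbd y hy
        simp only []; split_ifs <;> omega
      · simp only [hv]; split_ifs <;> omega
    · -- index invariant
      intro k hk
      simp only [List.length_set] at hk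
      rw [List.getElem_set]
      by_cases hki : i = k
      · subst hki
        have hlv : lu ≤ b + c := by
          have := hold; simp only [pvF] at this; split_ifs at this <;> omega
        have hpf : pvF lu ((if arr.getD i 0 < lu then lu else arr.getD i 0) + 1) = b + c := by
          rw [hv]; exact (by simp only [pvF]; split_ifs <;> omega)
        simp only [if_true, hpf, hix, PySem.Dict.getD_insert]
      · rw [if_neg hki]
        rw [hidx k hk, PySem.Dict.getD_insert]
        have hne : ¬ ((k : Int) + 1 = x) := by omega
        simp [hne]
  · -- max-all branch
    simp only [stepA_solution, stepB_solution, if_neg hg]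
    refine ⟨hlen, by simp [hmt], le_refl _, hbd, ?_⟩
    intro k hk
    have h1 := hbd arr[k] (List.getElem_mem hk)
    have : pvF mt arr[k] = mt := by simp only [pvF]; split_ifs <;> omega
    rw [this, PySem.Dict.getD_empty]
    omega

theorem pvInv_foldl (N : Int) (A : List Int) (sA : List Int × Int × Int)
    (sB : Int × PySem.Dict Int Int × Int) (h : pvInv N sA sB) :
    pvInv N (A.foldl (stepA_solution N) sA) (A.foldl (stepB_solution N) sB) := by
  induction A generalizing sA sB with
  | nil => exact h
  | cons a tl ih => exact ih _ _ (pvInv_step N a sA sB h)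

-- ===== VERDICT (by name: the statement is the Claim_ definition above) =====
theorem solution_spec : Claim_equal_solution := by
  intro N A _
  obtain ⟨hlen, -, -, -, hidx⟩ :=
    pvInv_foldl N A _ _ (pvInv_init N)
  unfold Spec_solution solution solution_alt
  set sA := A.foldl (stepA_solution N) (List.replicate N.toNat 0, 0, 0) with hsA
  set sB := A.foldl (stepB_solution N) (0, PySem.Dict.empty, 0) with hsB
  apply List.ext_getElem
  · simp [hlen, PySem.List.length_pyRange_one]
  · intro k h1 h2
    simp only [List.getElem_map]
    have hk : k < sA.1.length := by simpa using h1
    have := hidx k hk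
    simp only [pvF] at this
    have hpr : (PySem.List.pyRange 1 (N + 1) 1)[k]'(by simpa using h2) = (k : Int) + 1 := by
      rw [PySem.List.getElem_pyRange_one]
      omega
    rw [hpr]
    exact this
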